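-- pv_equiv track=rewrite | github.com/dawnvoid/button-finder | button_finder.py | has_extension
-- ===== SOURCE A (Python) =====
-- def has_extension(url: str):
--     while len(url) > 0:
--         if url[-1] == '/':
--             return False
--         elif url[-1] == '.':
--             return True
--         url = url[:-1]
--     return False
-- ===== SOURCE B (Python) =====
-- def has_extension(url: str):
--     last = url.rsplit('/', 1)[-1]
--     return '.' in last
-- ===== Notes on version B (the rewrite author's own statement) =====
-- stated objective: faster
-- what changed: Replaces the backward while loop that repeatedly copies the string via url[:-1] with one rsplit taking the last path segment followed by a single membership test for the dot character.
import Mathlib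
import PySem

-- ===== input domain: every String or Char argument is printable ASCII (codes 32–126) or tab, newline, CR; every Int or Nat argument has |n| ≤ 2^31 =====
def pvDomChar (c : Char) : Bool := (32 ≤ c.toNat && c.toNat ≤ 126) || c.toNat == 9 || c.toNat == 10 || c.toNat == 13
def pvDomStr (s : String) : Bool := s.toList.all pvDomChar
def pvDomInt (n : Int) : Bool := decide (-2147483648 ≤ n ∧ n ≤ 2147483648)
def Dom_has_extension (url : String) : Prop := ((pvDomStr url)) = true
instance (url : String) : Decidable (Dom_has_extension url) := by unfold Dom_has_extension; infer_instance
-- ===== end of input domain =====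

-- B replaces A's backward character-by-character scan with "last segment after the final '/', then '.' membership" (avoids A's repeated url[:-1] string copies; same return value).

-- ===== PORT A =====
-- A repeatedly inspects url[-1] and drops the last character: that is a structural
-- recursion over the reversed character list.
def hasExtLoop : List Char → Bool
  | [] => false                               -- while-condition fails: return False
  | c :: rest =>
      if c = '/' then false                   -- url[-1] == '/'
      else if c = '.' then true               -- url[-1] == '.'
      else hasExtLoop rest                    -- url = url[:-1]

def has_extension (url : String) : Bool := hasExtLoop url.toList.reverse

-- ===== PORT B =====
-- Hand port of url.rsplit('/', 1)[-1]: the suffix after the last '/' (exact: a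
-- single forward pass that restarts the accumulated segment at each '/').
def lastSeg (l : List Char) : List Char :=
  l.foldl (fun acc c => if c = '/' then [] else acc ++ [c]) []

def has_extension_alt (url : String) : Bool := (lastSeg url.toList).contains '.'

-- ===== PRECONDITION & SPEC =====
def Spec_has_extension (url : String) (out : Bool) : Prop := out = has_extension_alt url
instance (url : String) (out : Bool) : Decidable (Spec_has_extension url out) := by unfold Spec_has_extension; infer_instance

-- ===== CLAIM (what is proved, stated in full; the proofs are below) =====
def Claim_equal_has_extension : Prop := ∀ (url : String), Dom_has_extension url → Spec_has_extension url (has_extension url)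

-- ===== LEMMAS AND PROOFS =====
theorem lastSeg_contains_eq (l : List Char) :
    (lastSeg l).contains '.' = hasExtLoop l.reverse := by
  induction l using List.reverseRecOn with
  | nil => rfl
  | append_singleton l c ih =>
      simp only [lastSeg, List.foldl_append, List.foldl_cons, List.foldl_nil,
        List.reverse_append, List.reverse_cons, List.reverse_nil, List.nil_append,
        List.cons_append, hasExtLoop] at *
      by_cases hc : c = '/'
      · simp [hc]
      · by_cases hd : c = '.'
        · simp [hd]
        · have hdc : ¬ '.' = c := fun h => hd h.symm
          simp [if_neg hc, if_neg hd, ← ih, hdc]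

-- ===== VERDICT (by name: the statement is the Claim_ definition above) =====
theorem has_extension_spec : Claim_equal_has_extension := by
  intro url _
  unfold Spec_has_extension has_extension has_extension_alt
  exact (lastSeg_contains_eq url.toList).symm
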